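-- pv_equiv track=rewrite | github.com/Farzadsarfaraz/Final_project_ReDI | Final_project.py | get_floor_from_room_number
-- ===== SOURCE A (Python) =====
-- def get_floor_from_room_number(room_number):
--     floor_mappings = {
--         range(333, 351): '20. Stockwerk',
--         range(314, 333): '19. Stockwerk',
--         range(296, 314): '18. Stockwerk',
--         range(278, 296): '17. Stockwerk',
--         range(259, 278): '16. Stockwerk',
--         range(240, 259): '15. Stockwerk',
--         range(221, 240): '14. Stockwerk',
--         range(203, 221): '13. Stockwerk',
--         range(185, 203): '12. Stockwerk',
--         range(172, 185): '11. Stockwerk',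
--         range(154, 172): '10. Stockwerk',
--         range(136, 154): '9. Stockwerk',
--         range(118, 136): '8. Stockwerk',
--         range(100, 118): '7. Stockwerk',
--         range(82, 100): '6. Stockwerk',
--         range(64, 82): '5. Stockwerk',
--         range(46, 64): '4. Stockwerk',
--         range(28, 46): '3. Stockwerk',
--         range(10, 28): '2. Stockwerk',
--         range(1, 10): '1. Stockwerk'
--     }
--
--     for floor_range, floor_name in floor_mappings.items():
--         if room_number in floor_range:
--             return floor_name
-- ===== SOURCE B (Python) =====
-- _STARTS = [1, 10, 28, 46, 64, 82, 100, 118, 136, 154, 172, 185,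
--            203, 221, 240, 259, 278, 296, 314, 333, 351]
-- _NAMES = ['1. Stockwerk', '2. Stockwerk', '3. Stockwerk', '4. Stockwerk',
--           '5. Stockwerk', '6. Stockwerk', '7. Stockwerk', '8. Stockwerk',
--           '9. Stockwerk', '10. Stockwerk', '11. Stockwerk', '12. Stockwerk',
--           '13. Stockwerk', '14. Stockwerk', '15. Stockwerk', '16. Stockwerk',
--           '17. Stockwerk', '18. Stockwerk', '19. Stockwerk', '20. Stockwerk']
--
-- def get_floor_from_room_number(room_number):
--     # binary search for the rightmost lower bound <= room_number
--     lo, hi = 0, len(_STARTS)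
--     while lo < hi:
--         mid = (lo + hi) // 2
--         if _STARTS[mid] <= room_number:
--             lo = mid + 1
--         else:
--             hi = mid
--     i = lo - 1
--     if 0 <= i < len(_NAMES):
--         return _NAMES[i]
--     return None
-- ===== Notes on version B (the rewrite author's own statement) =====
-- stated objective: faster
-- what changed: Replaces the linear scan over the dict of range objects with a binary search over a precomputed sorted list of lower bounds plus a parallel list of floor names.
import Mathlib
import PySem

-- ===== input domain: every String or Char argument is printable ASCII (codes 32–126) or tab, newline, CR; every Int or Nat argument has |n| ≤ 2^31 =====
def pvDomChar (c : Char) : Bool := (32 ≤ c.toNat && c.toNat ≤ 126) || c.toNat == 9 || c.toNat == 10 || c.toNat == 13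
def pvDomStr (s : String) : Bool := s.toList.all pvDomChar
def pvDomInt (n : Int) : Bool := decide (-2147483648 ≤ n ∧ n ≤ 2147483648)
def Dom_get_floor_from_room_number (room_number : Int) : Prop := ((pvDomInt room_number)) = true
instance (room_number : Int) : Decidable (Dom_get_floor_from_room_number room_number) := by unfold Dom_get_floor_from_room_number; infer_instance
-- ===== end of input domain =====

-- B replaces A's linear scan of 20 ranges by a binary search over sorted lower bounds (objective: faster, constant factor).

-- ===== PORT A =====
-- the dict of ranges, in A's insertion order: ((lo, hi), name) with membership lo ≤ r < hi
def pvFloorMappings : List ((Int × Int) × String) :=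
  [((333, 351), "20. Stockwerk"), ((314, 333), "19. Stockwerk"), ((296, 314), "18. Stockwerk"),
   ((278, 296), "17. Stockwerk"), ((259, 278), "16. Stockwerk"), ((240, 259), "15. Stockwerk"),
   ((221, 240), "14. Stockwerk"), ((203, 221), "13. Stockwerk"), ((185, 203), "12. Stockwerk"),
   ((172, 185), "11. Stockwerk"), ((154, 172), "10. Stockwerk"), ((136, 154), "9. Stockwerk"),
   ((118, 136), "8. Stockwerk"), ((100, 118), "7. Stockwerk"), ((82, 100), "6. Stockwerk"),
   ((64, 82), "5. Stockwerk"), ((46, 64), "4. Stockwerk"), ((28, 46), "3. Stockwerk"),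
   ((10, 28), "2. Stockwerk"), ((1, 10), "1. Stockwerk")]

-- the 'for … items(): if room_number in floor_range: return …' loop
def pvScanFloors (r : Int) : List ((Int × Int) × String) → Option String
  | [] => none
  | e :: rest =>
      if e.1.1 ≤ r ∧ r < e.1.2 then some e.2 else pvScanFloors r rest

def get_floor_from_room_number (room_number : Int) : Option String :=
  pvScanFloors room_number pvFloorMappings

-- ===== PORT B =====
def pvStarts : List Int :=
  [1, 10, 28, 46, 64, 82, 100, 118, 136, 154, 172, 185, 203, 221, 240, 259, 278, 296, 314, 333, 351]

def pvNames : List String :=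
  ["1. Stockwerk", "2. Stockwerk", "3. Stockwerk", "4. Stockwerk", "5. Stockwerk",
   "6. Stockwerk", "7. Stockwerk", "8. Stockwerk", "9. Stockwerk", "10. Stockwerk",
   "11. Stockwerk", "12. Stockwerk", "13. Stockwerk", "14. Stockwerk", "15. Stockwerk",
   "16. Stockwerk", "17. Stockwerk", "18. Stockwerk", "19. Stockwerk", "20. Stockwerk"]

-- Source B's while loop: rightmost insertion point of room_number in pvStarts
def pvBisect (x : Int) (lo hi : Nat) : Nat :=
  if lo < hi then
    let mid := (lo + hi) / 2
    if pvStarts.getD mid 0 ≤ x then pvBisect x (mid + 1) hi else pvBisect x lo mid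
  else lo
termination_by hi - lo
decreasing_by all_goals omega

def get_floor_from_room_number_alt (room_number : Int) : Option String :=
  let i : Int := (pvBisect room_number 0 pvStarts.length : Int) - 1
  if 0 ≤ i ∧ i < (pvNames.length : Int) then some (pvNames.getD i.toNat "") else none

-- ===== PRECONDITION & SPEC =====
def Spec_get_floor_from_room_number (room_number : Int) (out : Option String) : Prop := out = get_floor_from_room_number_alt room_number
instance (room_number : Int) (out : Option String) : Decidable (Spec_get_floor_from_room_number room_number out) := by unfold Spec_get_floor_from_room_number; infer_instance

-- ===== CLAIM (what is proved, stated in full; the proofs are below) =====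
def Claim_equal_get_floor_from_room_number : Prop := ∀ (room_number : Int), Dom_get_floor_from_room_number room_number → Spec_get_floor_from_room_number room_number (get_floor_from_room_number room_number)

-- ===== LEMMAS AND PROOFS =====

-- bracketing invariant of the binary search: the result c lies in [lo, hi],
-- the element left of c (if inside the window) satisfies `≤ r`, the element at c does not
theorem pvBisect_bracket (r : Int) (n lo hi : Nat) (hn : hi - lo = n) :
    lo ≤ hi →
    lo ≤ pvBisect r lo hi ∧ pvBisect r lo hi ≤ hi ∧
    (lo < pvBisect r lo hi → pvStarts.getD (pvBisect r lo hi - 1) 0 ≤ r) ∧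
    (pvBisect r lo hi < hi → ¬ pvStarts.getD (pvBisect r lo hi) 0 ≤ r) := by
  induction n using Nat.strong_induction_on generalizing lo hi with
  | _ n IH =>
    intro hle
    rw [pvBisect]
    by_cases h1 : lo < hi
    · simp only [if_pos h1]
      by_cases h2 : pvStarts.getD ((lo + hi) / 2) 0 ≤ r
      · simp only [h2, if_true]
        have hrec := IH (hi - ((lo + hi) / 2 + 1)) (by omega) ((lo + hi) / 2 + 1) hi rfl (by omega)
        obtain ⟨ha, hb, hc, hd⟩ := hrec
        refine ⟨by omega, hb, ?_, hd⟩
        intro _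
        by_cases h3 : (lo + hi) / 2 + 1 < pvBisect r ((lo + hi) / 2 + 1) hi
        · exact hc h3
        · have : pvBisect r ((lo + hi) / 2 + 1) hi = (lo + hi) / 2 + 1 := by omega
          rw [this]
          simpa using h2
      · simp only [h2, if_false]
        have hrec := IH ((lo + hi) / 2 - lo) (by omega) lo ((lo + hi) / 2) rfl (by omega)
        obtain ⟨ha, hb, hc, hd⟩ := hrec
        refine ⟨ha, by omega, hc, ?_⟩
        intro _
        by_cases h3 : pvBisect r lo ((lo + hi) / 2) < (lo + hi) / 2
        · exact hd h3
        · have : pvBisect r lo ((lo + hi) / 2) = (lo + hi) / 2 := by omega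
          rw [this]; exact h2
    · simp only [if_neg h1]
      exact ⟨le_refl lo, by omega, by omega, by omega⟩

-- ===== VERDICT (by name: the statement is the Claim_ definition above) =====
set_option maxRecDepth 8000 in
set_option maxHeartbeats 1600000 in
theorem get_floor_from_room_number_spec : Claim_equal_get_floor_from_room_number := by
  intro r hdom
  replace hdom : -2147483648 ≤ r ∧ r ≤ 2147483648 := by
    simpa [Dom_get_floor_from_room_number, pvDomInt, decide_eq_true_eq] using hdom
  unfold Spec_get_floor_from_room_number get_floor_from_room_number get_floor_from_room_number_alt
  obtain ⟨h0, h21, hP, hQ⟩ := pvBisect_bracket r 21 0 21 rfl (by omega)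
  have hlen : pvStarts.length = 21 := rfl
  simp only [hlen]
  generalize hgen : pvBisect r 0 21 = c at h0 h21 hP hQ ⊢
  clear hgen
  have h1 : ((-2147483649 : Int) :: pvStarts).getD c 0 ≤ r := by
    rcases c with _ | c'
    · simp; omega
    · simpa using hP (by omega)
  have h2 : r < pvStarts.getD c 2147483649 := by
    by_cases h : c < 21
    · have hne := hQ h
      have e : pvStarts.getD c 2147483649 = pvStarts.getD c 0 := by
        rw [List.getD_eq_getElem _ _ (by rw [hlen]; omega),
            List.getD_eq_getElem _ _ (by rw [hlen]; omega)]
      rw [e]; omega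
    · have hce : c = 21 := by omega
      rw [hce]; simp [pvStarts]; omega
  clear hP hQ
  interval_cases c
  all_goals norm_num [pvStarts] at h1 h2
  all_goals simp only [pvScanFloors, pvFloorMappings]
  all_goals repeat rw [if_neg (by omega)]
  all_goals first | rfl | (rw [if_pos (by omega)]; try rfl)
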